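-- pv_equiv track=rewrite | github.com/ClementCrouan/NSI | Terminale/Mini-projet n°3/graphismes.py | __click_action
-- ===== SOURCE A (Python) =====
-- def __click_action(pos, nbButtons, nbOptions = None):
--     option = 0
--     clickedOnButton = False
--     for i in range (nbButtons):
--         if 355 < pos[0] < 672 and 585-i*45 < pos[1] < 615-i*45:
--             option = i
--             clickedOnButton = True
--     if not clickedOnButton:
--         return None
--     if option == 0:
--         return 0
--     elif nbOptions is not None:
--         return nbOptions - option
--     return nbButtons - option
-- ===== SOURCE B (Python) =====
-- def __click_action(pos, nbButtons, nbOptions=None):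
--     # Closed form: the 30px-high button bands (gap 15) are disjoint, so the
--     # unique candidate row is (614 - y) // 45; no loop over the buttons.
--     if nbButtons <= 0 or not (355 < pos[0] < 672):
--         return None
--     y = pos[1]
--     i = (614 - y) // 45
--     if not (0 <= i < nbButtons and 585 - 45 * i < y < 615 - 45 * i):
--         return None
--     if i == 0:
--         return 0
--     if nbOptions is not None:
--         return nbOptions - i
--     return nbButtons - i
-- ===== Notes on version B (the rewrite author's own statement) =====
-- stated objective: faster
-- what changed: Replaces the scan over all nbButtons rows with a closed-form candidate index (614 - y) // 45 checked once against the strict band bounds, relying on the bands being disjoint.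
import Mathlib
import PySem

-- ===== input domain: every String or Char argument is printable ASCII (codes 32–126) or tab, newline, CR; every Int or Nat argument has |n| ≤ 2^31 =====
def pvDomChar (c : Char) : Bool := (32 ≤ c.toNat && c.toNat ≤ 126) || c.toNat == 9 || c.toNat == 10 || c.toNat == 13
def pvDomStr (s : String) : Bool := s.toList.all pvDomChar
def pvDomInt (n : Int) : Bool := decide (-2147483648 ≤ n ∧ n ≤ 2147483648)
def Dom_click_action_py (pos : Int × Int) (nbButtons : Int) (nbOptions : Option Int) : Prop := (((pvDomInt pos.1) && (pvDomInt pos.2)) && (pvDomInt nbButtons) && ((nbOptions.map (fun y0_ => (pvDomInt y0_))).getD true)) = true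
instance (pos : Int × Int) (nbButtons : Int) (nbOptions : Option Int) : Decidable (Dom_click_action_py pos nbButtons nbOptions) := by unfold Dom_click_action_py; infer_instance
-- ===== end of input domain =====

-- B replaces A's scan over all button rows with a closed-form candidate index
-- (614 - y) // 45 checked once against the band bounds (objective: faster).

-- ===== PORT A =====
-- literal transliteration: loop over range(nbButtons) carrying (option, clickedOnButton)
def click_action_py (pos : Int × Int) (nbButtons : Int) (nbOptions : Option Int) : Option Int :=
  let st := (PySem.List.pyRange 0 nbButtons 1).foldl
    (fun (s : Int × Bool) i =>
      if 355 < pos.1 ∧ pos.1 < 672 ∧ 585 - i * 45 < pos.2 ∧ pos.2 < 615 - i * 45 then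
        (i, true)
      else s) (0, false)
  if st.2 = false then none
  else if st.1 = 0 then some 0
  else
    match nbOptions with
    | some nO => some (nO - st.1)
    | none => some (nbButtons - st.1)

-- ===== PORT B =====
def click_action_py_alt (pos : Int × Int) (nbButtons : Int) (nbOptions : Option Int) : Option Int :=
  if nbButtons ≤ 0 ∨ ¬ (355 < pos.1 ∧ pos.1 < 672) then none
  else
    let y := pos.2
    let i := PySem.Int.floordiv (614 - y) 45
    if ¬ (0 ≤ i ∧ i < nbButtons ∧ 585 - 45 * i < y ∧ y < 615 - 45 * i) then none
    else if i = 0 then some 0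
    else
      match nbOptions with
      | some nO => some (nO - i)
      | none => some (nbButtons - i)

-- ===== PRECONDITION & SPEC =====
def Spec_click_action_py (pos : Int × Int) (nbButtons : Int) (nbOptions : Option Int) (out : Option Int) : Prop := out = click_action_py_alt pos nbButtons nbOptions
instance (pos : Int × Int) (nbButtons : Int) (nbOptions : Option Int) (out : Option Int) : Decidable (Spec_click_action_py pos nbButtons nbOptions out) := by unfold Spec_click_action_py; infer_instance

-- ===== CLAIM (what is proved, stated in full; the proofs are below) =====
def Claim_equal_click_action_py : Prop := ∀ (pos : Int × Int) (nbButtons : Int) (nbOptions : Option Int), Dom_click_action_py pos nbButtons nbOptions → Spec_click_action_py pos nbButtons nbOptions (click_action_py pos nbButtons nbOptions)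

-- ===== LEMMAS AND PROOFS =====

-- characterisation of A's loop: the 30px bands are disjoint, so for any c with
-- 45*c ≤ 614 - y < 45*c + 45 (i.e. c = (614-y)//45) the loop ends in (c, true)
-- iff x is in range and row c is a valid hit band below nbButtons, else (0, false)
theorem loop_char (x y c : Int) (hc1 : 45 * c ≤ 614 - y) (hc2 : 614 - y < 45 * c + 45)
    (n : Nat) :
    (PySem.List.pyRange 0 (n : Int) 1).foldl
      (fun (s : Int × Bool) i =>
        if 355 < x ∧ x < 672 ∧ 585 - i * 45 < y ∧ y < 615 - i * 45 then (i, true) else s)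
      (0, false)
    = (if 355 < x ∧ x < 672 ∧ 0 ≤ c ∧ c < (n : Int)
          ∧ 585 - 45 * c < y ∧ y < 615 - 45 * c
       then (c, true) else (0, false)) := by
  induction n with
  | zero =>
      rw [PySem.List.pyRange_one_eq_nil (by omega), List.foldl_nil, if_neg (by omega)]
  | succ n ih =>
      have hsplit : (PySem.List.pyRange 0 ((n + 1 : Nat) : Int) 1)
          = PySem.List.pyRange 0 (n : Int) 1 ++ [(n : Int)] := by
        push_cast
        exact PySem.List.pyRange_one_succ_right (by omega)
      rw [hsplit, List.foldl_append, ih, List.foldl_cons, List.foldl_nil]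
      by_cases hhit : 355 < x ∧ x < 672 ∧ 585 - (n : Int) * 45 < y ∧ y < 615 - (n : Int) * 45
      · have hcn : c = (n : Int) := by omega
        rw [if_pos hhit, if_pos (by omega), hcn]
      · rw [if_neg hhit]
        split_ifs with h1 h2 h3
        · rfl
        · exact absurd (by omega) h2
        · exact absurd (by omega) h1
        · rfl

-- A with the loop state replaced by its characterisation
theorem a_char (pos : Int × Int) (nbOptions : Option Int) (n : Nat) :
    click_action_py pos (n : Int) nbOptions
    = (if 355 < pos.1 ∧ pos.1 < 672 ∧ 0 ≤ (614 - pos.2) / 45 ∧ (614 - pos.2) / 45 < (n : Int)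
          ∧ 585 - 45 * ((614 - pos.2) / 45) < pos.2 ∧ pos.2 < 615 - 45 * ((614 - pos.2) / 45)
       then (if (614 - pos.2) / 45 = 0 then some 0
             else match nbOptions with
                  | some nO => some (nO - (614 - pos.2) / 45)
                  | none => some ((n : Int) - (614 - pos.2) / 45))
       else none) := by
  unfold click_action_py
  rw [loop_char pos.1 pos.2 ((614 - pos.2) / 45) (by omega) (by omega) n]
  by_cases h : 355 < pos.1 ∧ pos.1 < 672 ∧ 0 ≤ (614 - pos.2) / 45 ∧ (614 - pos.2) / 45 < (n : Int)
      ∧ 585 - 45 * ((614 - pos.2) / 45) < pos.2 ∧ pos.2 < 615 - 45 * ((614 - pos.2) / 45)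
  · rw [if_pos h, if_pos h]
    rfl
  · rw [if_neg h, if_neg h]
    rfl

-- ===== VERDICT (by name: the statement is the Claim_ definition above) =====
theorem click_action_py_spec : Claim_equal_click_action_py := by
  intro pos nbButtons nbOptions _
  unfold Spec_click_action_py
  by_cases hnb : nbButtons ≤ 0
  · unfold click_action_py
    simp only [click_action_py_alt]
    rw [PySem.List.pyRange_one_eq_nil hnb, if_pos (Or.inl hnb)]
    rfl
  · obtain ⟨n, hn⟩ : ∃ n : Nat, nbButtons = (n : Int) := ⟨nbButtons.toNat, by omega⟩
    subst hn
    rw [a_char]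
    simp only [click_action_py_alt]
    rw [PySem.Int.floordiv_eq_ediv_of_pos (a := 614 - pos.2) (by norm_num)]
    by_cases hx : 355 < pos.1 ∧ pos.1 < 672
    · rw [if_neg (show ¬ ((n : Int) ≤ 0 ∨ ¬ (355 < pos.1 ∧ pos.1 < 672)) by omega)]
      by_cases hband : 0 ≤ (614 - pos.2) / 45 ∧ (614 - pos.2) / 45 < (n : Int)
          ∧ 585 - 45 * ((614 - pos.2) / 45) < pos.2 ∧ pos.2 < 615 - 45 * ((614 - pos.2) / 45)
      · rw [if_pos ⟨hx.1, hx.2, hband.1, hband.2.1, hband.2.2.1, hband.2.2.2⟩,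
            if_neg (not_not_intro hband)]
      · rw [if_neg (fun hC => hband ⟨hC.2.2.1, hC.2.2.2.1, hC.2.2.2.2.1, hC.2.2.2.2.2⟩),
            if_pos hband]
    · rw [if_pos (Or.inr hx), if_neg (fun hC => hx ⟨hC.1, hC.2.1⟩)]
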